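-- pv_equiv track=rewrite | github.com/sydneylam/lab2 | findfour.py | is_win_state
-- ===== SOURCE A (Python) =====
-- def is_win_state(chip, board, row, column):
--     # checking horizontal win-state
--     counter = 0
--     num_chips = 0
--     # looping through every element in the given row
--     while counter < len(board[0]):
--         if board[row][counter] == chip:
--             num_chips += 1
--         if num_chips >= 4:
--             return True
--         if num_chips > 0 and board[row][counter] != chip:
--             num_chips = 0
--         counter += 1
--
--     # vertical
--     counter1 = 0
--     num_chips1 = 0
--     # looping through every element in the given column
--     while counter1 < len(board):
--         if board[counter1][column] == chip:
--             num_chips1 += 1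
--         if num_chips1 >= 4:
--             return True
--         if num_chips1 > 0 and board[counter1][column] != chip:
--             num_chips1 = 0
--         counter1 += 1
--
--     # checking if there is either a horizontal or vertical win state
--     if num_chips1 >= 4:
--         return True
--     elif num_chips >= 4:
--         return True
--     else:
--         return False
-- ===== SOURCE B (Python) =====
-- def is_win_state(chip, board, row, column):
--     rowseq = board[row]
--     colseq = [r[column] for r in board]
--
--     def has_run(seq):
--         return any(all(seq[i + j] == chip for j in range(4))
--                    for i in range(len(seq) - 3))
--
--     return has_run(rowseq) or has_run(colseq)
-- ===== Notes on version B (the rewrite author's own statement) =====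
-- stated objective: idiomatic
-- what changed: A's two stateful while-loops with a running consecutive-chip counter and early returns are replaced by extracting the row and column as explicit sequences and testing each with a sliding any/all window of width 4.
-- outside the precondition, e.g. on is_win_state(1, [[2], [1, 1, 1, 1]], 1, 0): A returns False, B returns True; on is_win_state(1, [[1, 1, 1, 1]], 0, 99): A returns True, B raises IndexError
import Mathlib
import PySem

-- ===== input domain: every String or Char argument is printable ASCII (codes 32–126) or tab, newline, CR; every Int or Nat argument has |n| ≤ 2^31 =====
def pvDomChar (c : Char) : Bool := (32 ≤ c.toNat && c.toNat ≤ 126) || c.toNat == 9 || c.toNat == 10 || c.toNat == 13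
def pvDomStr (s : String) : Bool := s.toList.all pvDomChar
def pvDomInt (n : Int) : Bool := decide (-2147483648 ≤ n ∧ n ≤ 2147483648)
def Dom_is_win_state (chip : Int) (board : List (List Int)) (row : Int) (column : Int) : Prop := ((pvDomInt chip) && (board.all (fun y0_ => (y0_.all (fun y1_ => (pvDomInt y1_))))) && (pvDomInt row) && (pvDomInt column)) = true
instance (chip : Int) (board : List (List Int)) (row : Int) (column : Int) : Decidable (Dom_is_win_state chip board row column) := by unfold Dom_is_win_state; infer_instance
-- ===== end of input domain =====

-- B replaces A's two stateful counter while-loops by explicit row/column sequences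
-- tested with a sliding any/all window of width 4 (idiomatic decomposition, same cost).


-- ===== PORT A =====
-- A's while-loop: fuel = number of remaining iterations, `get i` = the cell access of
-- that loop (board[row][counter] resp. board[counter1][column]); returns
-- (early-returned-True?, final num_chips).  pyGet?.getD is exact under Pre_ (index in range).
def pvLoopA (chip : Int) (get : Int → Int) : Nat → Int → Int → Bool × Int
  | 0, _, num => (false, num)
  | f + 1, counter, num =>
      let cell := get counter
      let num' := if cell == chip then num + 1 else num
      if 4 ≤ num' then (true, num')
      else pvLoopA chip get f (counter + 1) (if decide (0 < num') && (cell != chip) then 0 else num')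

def is_win_state (chip : Int) (board : List (List Int)) (row : Int) (column : Int) : Bool :=
  let width := ((PySem.List.pyGet? board 0).getD []).length          -- len(board[0])
  let rowL := (PySem.List.pyGet? board row).getD []                  -- board[row]
  let p := pvLoopA chip (fun i => (PySem.List.pyGet? rowL i).getD 0) width 0 0
  if p.1 then true
  else
    let q := pvLoopA chip
      (fun i => (PySem.List.pyGet? ((PySem.List.pyGet? board i).getD []) column).getD 0)
      board.length 0 0
    if q.1 then true
    else if 4 ≤ q.2 then true
    else if 4 ≤ p.2 then true
    else false

-- ===== PORT B =====
-- has_run(seq) = any(all(seq[i+j] == chip for j in range(4)) for i in range(len(seq)-3))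
def pvHasRun (chip : Int) (seq : List Int) : Bool :=
  (PySem.List.pyRange 0 ((seq.length : Int) - 3) 1).any fun i =>
    (PySem.List.pyRange 0 4 1).all fun j =>
      ((PySem.List.pyGet? seq (i + j)).getD 0) == chip

def is_win_state_alt (chip : Int) (board : List (List Int)) (row : Int) (column : Int) : Bool :=
  let rowseq := (PySem.List.pyGet? board row).getD []                       -- board[row]
  let colseq := board.map (fun r => (PySem.List.pyGet? r column).getD 0)    -- [r[column] for r in board]
  pvHasRun chip rowseq || pvHasRun chip colseq

-- ===== PRECONDITION & SPEC =====
-- Pre_ excludes the inputs on which A raises (row or column index out of range, a row too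
-- short for the loops) and, via the rectangularity conjunct, ragged boards: on a ragged
-- board neither behaviour is specified for a game grid — A scans only the first
-- len(board[0]) cells of the row and may early-return before reaching a short row, while
-- B, which extracts the whole row and the whole column, may raise IndexError there.
def Pre_is_win_state (chip : Int) (board : List (List Int)) (row : Int) (column : Int) : Prop :=
  board ≠ [] ∧
  (∀ r ∈ board, r.length = board.headI.length) ∧
  PySem.Raise.InRange board.length row ∧
  PySem.Raise.InRange board.headI.length column

instance (chip : Int) (board : List (List Int)) (row : Int) (column : Int) : Decidable (Pre_is_win_state chip board row column) := by unfold Pre_is_win_state; infer_instance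

def pvWitness_is_win_state : Int × List (List Int) × Int × Int := (1, [[1, 1, 1, 1], [0, 1, 0, 2]], 0, -1)

def Spec_is_win_state (chip : Int) (board : List (List Int)) (row : Int) (column : Int) (out : Bool) : Prop := out = is_win_state_alt chip board row column
instance (chip : Int) (board : List (List Int)) (row : Int) (column : Int) (out : Bool) : Decidable (Spec_is_win_state chip board row column out) := by unfold Spec_is_win_state; infer_instance

-- ===== CLAIM (what is proved, stated in full; the proofs are below) =====
def Claim_equal_is_win_state : Prop := ∀ (chip : Int) (board : List (List Int)) (row : Int) (column : Int), Dom_is_win_state chip board row column → Pre_is_win_state chip board row column → Spec_is_win_state chip board row column (is_win_state chip board row column)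

-- ===== LEMMAS AND PROOFS =====

def pvPref4 (c : Int) : List Int → Bool
  | a :: b :: d :: e :: _ => a == c && b == c && d == c && e == c
  | _ => false
def pvInfix4 (c : Int) : List Int → Bool
  | [] => false
  | x :: xs => pvPref4 c (x :: xs) || pvInfix4 c xs

theorem pvPref4_short (c : Int) (l : List Int) (h : l.length ≤ 3) : pvPref4 c l = false := by
  rcases l with _|⟨a,_|⟨b,_|⟨d,_|⟨e,l⟩⟩⟩⟩
  · rfl
  · rfl
  · rfl
  · rfl
  · exfalso; simp at h; omega

theorem pvInfix4_short (c : Int) (l : List Int) (h : l.length ≤ 3) : pvInfix4 c l = false := by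
  induction l with
  | nil => rfl
  | cons x xs ih =>
      simp only [pvInfix4, Bool.or_eq_false_iff]
      exact ⟨pvPref4_short _ _ h, ih (by simp at h ⊢; omega)⟩

theorem pvPref4_cons1 (c x : Int) (l : List Int) (hx : ¬ x = c) : pvPref4 c (x :: l) = false := by
  rcases l with _|⟨b,_|⟨d,_|⟨e,l⟩⟩⟩ <;> simp [pvPref4, hx]
theorem pvPref4_cons2 (c a x : Int) (l : List Int) (hx : ¬ x = c) : pvPref4 c (a :: x :: l) = false := by
  rcases l with _|⟨d,_|⟨e,l⟩⟩ <;> simp [pvPref4, hx]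
theorem pvPref4_cons3 (c a b x : Int) (l : List Int) (hx : ¬ x = c) : pvPref4 c (a :: b :: x :: l) = false := by
  rcases l with _|⟨e,l⟩ <;> simp [pvPref4, hx]

theorem pvPref4_cons4 (c a b d x : Int) (l : List Int) (hx : ¬ x = c) : pvPref4 c (a :: b :: d :: x :: l) = false := by
  simp [pvPref4, hx]

theorem pvInfix4_rep_cons (c x : Int) (xs : List Int) (hx : ¬ x = c) :
    ∀ m : Nat, m ≤ 3 → pvInfix4 c (List.replicate m c ++ x :: xs) = pvInfix4 c xs := by
  intro m hm
  interval_cases m <;>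
    simp [pvInfix4, List.replicate, pvPref4_cons1, pvPref4_cons2, pvPref4_cons3, pvPref4_cons4, hx]
def pvRunA (chip : Int) : Int → List Int → Bool × Int
  | num, [] => (false, num)
  | num, x :: xs =>
      let num' := if x == chip then num + 1 else num
      if 4 ≤ num' then (true, num')
      else pvRunA chip (if decide (0 < num') && (x != chip) then 0 else num') xs

theorem pvRunA_fst (c : Int) :
    ∀ (l : List Int) (n : Int), 0 ≤ n → n ≤ 3 →
      (pvRunA c n l).1 = pvInfix4 c (List.replicate n.toNat c ++ l) := by
  intro l
  induction l with
  | nil =>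
      intro n h0 h3
      have hlen : (List.replicate n.toNat c).length ≤ 3 := by simp; omega
      simp [pvRunA, pvInfix4_short c _ hlen]
  | cons x xs ih =>
      intro n h0 h3
      by_cases hx : x = c
      · rw [hx]
        by_cases h4 : n = 3
        · rw [h4]
          simp [pvRunA, pvInfix4, pvPref4, List.replicate]
        · have hstep : pvRunA c n (c :: xs) = pvRunA c (n + 1) xs := by
            simp [pvRunA, show ¬(4:Int) ≤ n + 1 by omega]
          rw [hstep, ih (n + 1) (by omega) (by omega)]
          have hrep : List.replicate (n + 1).toNat c = List.replicate n.toNat c ++ [c] := by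
            rw [show (n + 1).toNat = n.toNat + 1 by omega, List.replicate_succ']
          rw [hrep, List.append_assoc]
          rfl
      · have hstep : pvRunA c n (x :: xs) = pvRunA c 0 xs := by
          by_cases hn : 0 < n
          · simp [pvRunA, hx, hn, show ¬(4:Int) ≤ n by omega]
          · simp [pvRunA, hx, show n = 0 by omega]
        rw [hstep, ih 0 le_rfl (by omega)]
        simp only [Int.toNat_zero, List.replicate_zero, List.nil_append]
        rw [pvInfix4_rep_cons c x xs hx n.toNat (by omega)]

theorem pvRunA_snd (c : Int) :
    ∀ (l : List Int) (n : Int), n ≤ 3 → (pvRunA c n l).1 = false → (pvRunA c n l).2 ≤ 3 := by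
  intro l
  induction l with
  | nil => intro n h3 _; simpa [pvRunA] using h3
  | cons x xs ih =>
      intro n h3 hf
      by_cases hx : x = c
      · rw [hx] at hf ⊢
        by_cases h4 : 4 ≤ n + 1
        · exfalso
          simp [pvRunA, h4] at hf
        · have hstep : pvRunA c n (c :: xs) = pvRunA c (n + 1) xs := by
            simp [pvRunA, h4]
          rw [hstep] at hf ⊢
          exact ih (n + 1) (by omega) hf
      · by_cases h4 : 4 ≤ n
        · exfalso; omega
        · have hstep : pvRunA c n (x :: xs) = pvRunA c (if decide (0 < n) = true then 0 else n) xs := by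
            simp [pvRunA, hx, h4]
          by_cases hn : 0 < n
          · simp only [hn, decide_true, if_true] at hstep
            rw [hstep] at hf ⊢
            exact ih 0 (by omega) hf
          · simp only [hn, decide_false] at hstep
            simp at hstep
            rw [hstep] at hf ⊢
            exact ih n h3 hf
theorem pvLoopA_eq_pvRunA (chip : Int) (get : Int → Int) :
    ∀ (l : List Int) (k num : Int),
      (∀ j : Nat, j < l.length → get (k + (j : Int)) = l.getD j 0) →
      pvLoopA chip get l.length k num = pvRunA chip num l := by
  intro l
  induction l with
  | nil => intro k num _; rfl
  | cons x xs ih =>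
      intro k num hget
      have h0 : get k = x := by
        have := hget 0 (by simp)
        simpa using this
      show pvLoopA chip get (xs.length + 1) k num = pvRunA chip num (x :: xs)
      rw [pvLoopA, pvRunA, h0]
      have hrec : ∀ j : Nat, j < xs.length → get ((k + 1) + (j : Int)) = xs.getD j 0 := by
        intro j hj
        have := hget (j + 1) (by simp; omega)
        rw [show (k + ((j + 1 : Nat) : Int)) = k + 1 + (j : Int) by push_cast; ring] at this
        simpa using this
      split <;> split <;> first | rfl | exact ih (k + 1) _ hrec
theorem pvInfix4_eq_any (c : Int) :
    ∀ s : List Int, pvInfix4 c s = (List.range (s.length - 3)).any (fun k => pvPref4 c (s.drop k)) := by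
  intro s
  induction s with
  | nil => rfl
  | cons x xs ih =>
      by_cases h : xs.length ≤ 2
      · rw [pvInfix4_short c _ (by simp; omega)]
        rw [show (x :: xs).length - 3 = 0 by simp; omega]
        rfl
      · rw [show (x :: xs).length - 3 = (xs.length - 3) + 1 by simp; omega,
            List.range_succ_eq_map]
        simp only [List.any_cons, List.any_map, Function.comp_def, List.drop_succ_cons,
          List.drop_zero]
        rw [pvInfix4, ih]
theorem pvAny_congr {α : Type} (l : List α) (f g : α → Bool) (h : ∀ a ∈ l, f a = g a) :
    l.any f = l.any g := by
  induction l with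
  | nil => rfl
  | cons x xs ih => simp_all [List.any_cons]

theorem pvWindow_eq_pref4 (c : Int) (s : List Int) (k : Nat) (hk : k + 3 < s.length) :
    ((PySem.List.pyRange 0 4 1).all fun j =>
      ((PySem.List.pyGet? s ((0 + (k : Int)) + j)).getD 0) == c) = pvPref4 c (s.drop k) := by
  have hd : s.drop k = s[k]'(by omega) :: s[k+1]'(by omega) :: s[k+2]'(by omega) ::
      s[k+3]'(by omega) :: s.drop (k+4) := by
    rw [List.drop_eq_getElem_cons (by omega), List.drop_eq_getElem_cons (by omega),
        List.drop_eq_getElem_cons (by omega), List.drop_eq_getElem_cons (by omega)]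
  have e0 : (PySem.List.pyGet? s (0 + (k : Int) + 0)).getD 0 = s[k]'(by omega) := by
    rw [show 0 + (k : Int) + 0 = ((k : Nat) : Int) by ring,
        PySem.List.pyGet?_natCast, List.getElem?_eq_getElem (by omega)]; rfl
  have e1 : (PySem.List.pyGet? s (0 + (k : Int) + 1)).getD 0 = s[k+1]'(by omega) := by
    rw [show 0 + (k : Int) + 1 = ((k + 1 : Nat) : Int) by push_cast; ring,
        PySem.List.pyGet?_natCast, List.getElem?_eq_getElem (by omega)]; rfl
  have e2 : (PySem.List.pyGet? s (0 + (k : Int) + 2)).getD 0 = s[k+2]'(by omega) := by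
    rw [show 0 + (k : Int) + 2 = ((k + 2 : Nat) : Int) by push_cast; ring,
        PySem.List.pyGet?_natCast, List.getElem?_eq_getElem (by omega)]; rfl
  have e3 : (PySem.List.pyGet? s (0 + (k : Int) + 3)).getD 0 = s[k+3]'(by omega) := by
    rw [show 0 + (k : Int) + 3 = ((k + 3 : Nat) : Int) by push_cast; ring,
        PySem.List.pyGet?_natCast, List.getElem?_eq_getElem (by omega)]; rfl
  rw [show PySem.List.pyRange 0 4 1 = [0, 1, 2, 3] by decide]
  simp only [List.all_cons, List.all_nil, Bool.and_true]
  rw [e0, e1, e2, e3, hd]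
  simp [pvPref4, Bool.and_assoc]

theorem pvHasRun_eq_pvInfix4 (c : Int) (s : List Int) : pvHasRun c s = pvInfix4 c s := by
  rw [pvHasRun, PySem.List.pyRange_one, List.any_map, pvInfix4_eq_any,
      show (((s.length : Int) - 3) - 0).toNat = s.length - 3 by omega]
  apply pvAny_congr
  intro k hk
  rw [List.mem_range] at hk
  exact pvWindow_eq_pref4 c s k (by omega)

theorem pvMain (chip : Int) (board : List (List Int)) (row : Int) (column : Int)
    (hpre : Pre_is_win_state chip board row column) :
    is_win_state chip board row column = is_win_state_alt chip board row column := by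
  obtain ⟨hne, hrect, hrow, hcol⟩ := hpre
  -- board[row] succeeds
  obtain ⟨rl, hrl⟩ : ∃ rl, PySem.List.pyGet? board row = some rl := by
    cases h : PySem.List.pyGet? board row with
    | none => exact absurd hrow ((PySem.List.pyGet?_eq_none_iff board row).mp h)
    | some rl => exact ⟨rl, rfl⟩
  have hlen : rl.length = board.headI.length :=
    hrect rl (PySem.List.mem_of_pyGet?_eq_some board hrl)
  rcases board with _ | ⟨b0, bt⟩
  · exact absurd rfl hne
  have hlen' : rl.length = b0.length := hlen
  -- the column sequence of B
  set f : List Int → Int := fun r => (PySem.List.pyGet? r column).getD 0 with hf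
  have hH : pvLoopA chip (fun i => (PySem.List.pyGet? rl i).getD 0) b0.length 0 0 =
      pvRunA chip 0 rl := by
    rw [← hlen']
    apply pvLoopA_eq_pvRunA
    intro j hj
    rw [zero_add, PySem.List.pyGet?_natCast, List.getD_eq_getElem?_getD]
  have hV : pvLoopA chip
      (fun i => (PySem.List.pyGet? ((PySem.List.pyGet? (b0 :: bt) i).getD []) column).getD 0)
      (b0 :: bt).length 0 0 = pvRunA chip 0 ((b0 :: bt).map f) := by
    rw [show (b0 :: bt).length = ((b0 :: bt).map f).length by simp]
    apply pvLoopA_eq_pvRunA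
    intro j hj
    rw [List.length_map] at hj
    rw [zero_add, PySem.List.pyGet?_natCast, List.getElem?_eq_getElem hj, Option.getD_some,
        List.getD_eq_getElem?_getD, List.getElem?_map, List.getElem?_eq_getElem hj]
    rfl
  have hruns := pvRunA_fst chip rl 0 (by omega) (by omega)
  have hrunc := pvRunA_fst chip ((b0 :: bt).map f) 0 (by omega) (by omega)
  simp only [Int.toNat_zero, List.replicate_zero, List.nil_append] at hruns hrunc
  have hsnds := pvRunA_snd chip rl 0 (by omega)
  have hsndc := pvRunA_snd chip ((b0 :: bt).map f) 0 (by omega)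
  show (let width := ((PySem.List.pyGet? (b0 :: bt) 0).getD []).length
        let rowL := (PySem.List.pyGet? (b0 :: bt) row).getD []
        let p := pvLoopA chip (fun i => (PySem.List.pyGet? rowL i).getD 0) width 0 0
        if p.1 then true
        else
          let q := pvLoopA chip
            (fun i => (PySem.List.pyGet? ((PySem.List.pyGet? (b0 :: bt) i).getD []) column).getD 0)
            (b0 :: bt).length 0 0
          if q.1 then true
          else if 4 ≤ q.2 then true
          else if 4 ≤ p.2 then true
          else false) = _
  simp only [hrl, Option.getD_some, PySem.List.pyGet?_zero_cons]
  rw [hH, hV]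
  simp only [is_win_state_alt, hrl, Option.getD_some]
  rw [pvHasRun_eq_pvInfix4, pvHasRun_eq_pvInfix4, ← hruns, ← hrunc]
  cases hA : (pvRunA chip 0 rl).1 <;> cases hB : (pvRunA chip 0 ((b0 :: bt).map f)).1 <;>
    simp [hA, hB]
  · exact ⟨by have := hsndc hB; simp only [List.map_cons] at this ⊢; omega,
            by have := hsnds hA; omega⟩

-- ===== VERDICT (by name: the statement is the Claim_ definition above) =====
theorem is_win_state_spec : Claim_equal_is_win_state := by
  intro chip board row column _ hpre
  exact pvMain chip board row column hpre
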